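-- pv_equiv track=rewrite | github.com/Zarivate/Coding-Questions | optimalFreelance.py | optimalFreelance
-- ===== SOURCE A (Python) =====
-- def optimalFreelance(jobs):
--     # 7 days in a week
--     daysLeft = 7
--     # Variable to hold the total pay
--     totalPay = 0
--     # While loop that at most will iterate 7 times
--     while daysLeft > 0:
--         # Variable to hold the maximum amount of payment on the day
--         maxDayPay = 0
--         # Position of the job in the jobs array
--         jobIdx = None
--         # Iterate through every job in the jobs array, while keeping track of their positions
--         for idx, job in enumerate(jobs):
--             # If job is found that is greater than the number of daysLeft to work in the week, in otherwords a job
--             # that has a deadline capable of being done within any day on and before the daysLeft, and the payment is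
--             # greater than the previously found maxPayment of another job
--             if job["deadline"] >= daysLeft and job["payment"] > maxDayPay:
--                 # Set the maxDayPay variable equal to that job's payment
--                 maxDayPay = job["payment"]
--                 # Store the idx
--                 jobIdx = idx
--
--         # If the pay is greater than 0
--         if maxDayPay != 0:
--             # Add it to the total
--             totalPay += maxDayPay
--             # Remove the job from the jobs array to shorten iteration
--             jobs.pop(jobIdx)
--         # Decrement the possible days able to work
--         daysLeft -= 1
--     return totalPay
-- ===== SOURCE B (Python) =====
-- def optimalFreelance(jobs):
--     # Classic job-sequencing greedy: consider jobs in payment-descending order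
--     # (stable, so earlier-listed jobs win ties) and schedule each on a day if
--     # one is still free for it.  Note: does not mutate `jobs` (A pops from it);
--     # the return value is the same.
--     cand = sorted(
--         [(job["payment"], job["deadline"]) for job in jobs
--          if job["deadline"] >= 1 and job["payment"] > 0],
--         key=lambda t: t[0], reverse=True)
--     total = 0
--     for day in range(7, 0, -1):
--         for k in range(len(cand)):
--             if cand[k][1] >= day:
--                 total += cand[k][0]
--                 del cand[k]
--                 break
--     return total
-- ===== Notes on version B (the rewrite author's own statement) =====
-- stated objective: idiomatic
-- what changed: A runs seven argmax-scan-and-pop passes over the remaining job list (one per day, latest day first); B is the classic job-sequencing greedy: filter to schedulable jobs (deadline >= 1, payment > 0), stable-sort once by payment descending, then for each day take the first still-listed job whose deadline covers it; B also does not mutate the jobs argument, while A pops the selected jobs out of it.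
import Mathlib
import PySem

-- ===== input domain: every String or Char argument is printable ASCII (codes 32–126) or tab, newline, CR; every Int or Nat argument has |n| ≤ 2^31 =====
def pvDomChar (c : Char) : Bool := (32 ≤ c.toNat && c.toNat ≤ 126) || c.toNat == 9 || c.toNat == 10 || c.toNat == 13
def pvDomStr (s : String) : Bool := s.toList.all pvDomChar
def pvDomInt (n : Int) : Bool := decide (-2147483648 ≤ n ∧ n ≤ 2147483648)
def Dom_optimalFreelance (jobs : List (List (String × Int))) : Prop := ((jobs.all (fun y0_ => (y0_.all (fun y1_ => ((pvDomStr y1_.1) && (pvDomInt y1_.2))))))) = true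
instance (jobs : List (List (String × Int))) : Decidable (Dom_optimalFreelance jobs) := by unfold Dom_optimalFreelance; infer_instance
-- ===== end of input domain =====

-- B replaces A's 7 repeated argmax-and-pop scans by the classic job-sequencing greedy
-- (sort by payment descending once, then assign); equivalence is about the RETURN VALUE
-- only — A pops the selected jobs out of its argument, B does not mutate it.

-- ===== PORT A =====
-- job["payment"] / job["deadline"]: Pre_ guarantees the key is present wherever the
-- Python reads it, so getD's default is never observed inside Pre_.
def pvPay (j : List (String × Int)) : Int := (List.lookup "payment" j).getD 0
def pvDl (j : List (String × Int)) : Int := (List.lookup "deadline" j).getD 0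

-- inner 'for idx, job in enumerate(jobs)' loop: running (maxDayPay, jobIdx)
def innerA (d : Int) (jobs : List (List (String × Int))) : Int × Option Int :=
  (PySem.List.enumerate jobs).foldl
    (fun acc ij => if pvDl ij.2 ≥ d ∧ pvPay ij.2 > acc.1 then (pvPay ij.2, some ij.1) else acc)
    (0, none)

-- 'while daysLeft > 0' loop, daysLeft = n+1 counting down
def loopA : Nat → List (List (String × Int)) → Int → Int
  | 0, _, total => total
  | n+1, jobs, total =>
    let r := innerA ((n : Int) + 1) jobs
    if r.1 ≠ 0 then
      match PySem.List.pop? jobs (r.2.getD 0) with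
      | some pr => loopA n pr.2 (total + r.1)
      | none => loopA n jobs (total + r.1)  -- unreachable: jobIdx is a valid index whenever maxDayPay ≠ 0
    else loopA n jobs total

def optimalFreelance (jobs : List (List (String × Int))) : Int := loopA 7 jobs 0

-- ===== PORT B =====
-- 'for k in range(len(cand)): if cand[k][1] >= day: … del cand[k]; break' —
-- find-first-eligible, returning its payment and the list with it deleted
def pickB (d : Int) : List (Int × Int) → Option (Int × List (Int × Int))
  | [] => none
  | x :: rest =>
    if x.2 ≥ d then some (x.1, rest)
    else match pickB d rest with
      | some pr => some (pr.1, x :: pr.2)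
      | none => none

-- 'for day in range(7, 0, -1)', day = n+1
def loopB : Nat → List (Int × Int) → Int → Int
  | 0, _, total => total
  | n+1, cand, total =>
    match pickB ((n : Int) + 1) cand with
    | some pr => loopB n pr.2 (total + pr.1)
    | none => loopB n cand total

def optimalFreelance_alt (jobs : List (List (String × Int))) : Int :=
  loopB 7
    (PySem.List.sorted
      ((jobs.filter (fun j => decide (1 ≤ pvDl j ∧ 0 < pvPay j))).map (fun j => (pvPay j, pvDl j)))
      (fun t => t.1) true)
    0

-- ===== PRECONDITION & SPEC =====
-- Pre_ excludes exactly the inputs on which the Python A raises KeyError: a job without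
-- a "deadline" key, or a job whose deadline is ≥ 1 but which has no "payment" key.
def Pre_optimalFreelance (jobs : List (List (String × Int))) : Prop :=
  ∀ j ∈ jobs, (List.lookup "deadline" j).isSome = true ∧
    (1 ≤ pvDl j → (List.lookup "payment" j).isSome = true)
instance (jobs : List (List (String × Int))) : Decidable (Pre_optimalFreelance jobs) := by
  unfold Pre_optimalFreelance; infer_instance

def pvWitness_optimalFreelance : (List (List (String × Int))) :=
  [[("deadline", 3), ("payment", 10)], [("deadline", 0)]]

def Spec_optimalFreelance (jobs : List (List (String × Int))) (out : Int) : Prop := out = optimalFreelance_alt jobs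
instance (jobs : List (List (String × Int))) (out : Int) : Decidable (Spec_optimalFreelance jobs out) := by unfold Spec_optimalFreelance; infer_instance

-- ===== CLAIM (what is proved, stated in full; the proofs are below) =====
def Claim_equal_optimalFreelance : Prop := ∀ (jobs : List (List (String × Int))), Dom_optimalFreelance jobs → Pre_optimalFreelance jobs → Spec_optimalFreelance jobs (optimalFreelance jobs)

-- ===== LEMMAS AND PROOFS =====

-- proof-side abbreviations
def pvPairs (jobs : List (List (String × Int))) : List (Int × Int) :=
  (jobs.filter (fun j => decide (1 ≤ pvDl j ∧ 0 < pvPay j))).map (fun j => (pvPay j, pvDl j))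
def pvIns (y : Int × Int) (S : List (Int × Int)) : List (Int × Int) :=
  PySem.List.insertBy (fun a b => decide (b.1 < a.1)) y S
def pvSortR (l : List (Int × Int)) : List (Int × Int) :=
  PySem.List.sorted l (fun t => t.1) true
def pvBest (d : Int) (l : List (Int × Int)) : Int :=
  l.foldl (fun m x => if x.2 ≥ d ∧ x.1 > m then x.1 else m) 0
def pvBestJ (d : Int) (jobs : List (List (String × Int))) : Int :=
  jobs.foldl (fun m j => if pvDl j ≥ d ∧ pvPay j > m then pvPay j else m) 0
def pvQ (d M : Int) (x : Int × Int) : Bool := decide (x.2 ≥ d) && (x.1 == M)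

lemma sortR_snoc (l : List (Int × Int)) (y : Int × Int) :
    pvSortR (l ++ [y]) = pvIns y (pvSortR l) := by
  simp only [pvSortR, pvIns, PySem.List.sorted_rev_eq_foldl_insertBy, List.foldl_append,
    List.foldl_cons, List.foldl_nil]

lemma best_fold_props (d : Int) (l : List (Int × Int)) (m : Int) :
    m ≤ l.foldl (fun m x => if x.2 ≥ d ∧ x.1 > m then x.1 else m) m ∧
    (∀ x ∈ l, x.2 ≥ d → x.1 ≤ l.foldl (fun m x => if x.2 ≥ d ∧ x.1 > m then x.1 else m) m) ∧
    (l.foldl (fun m x => if x.2 ≥ d ∧ x.1 > m then x.1 else m) m ≠ m →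
      ∃ x ∈ l, x.2 ≥ d ∧ x.1 = l.foldl (fun m x => if x.2 ≥ d ∧ x.1 > m then x.1 else m) m) := by
  induction l generalizing m with
  | nil => simp
  | cons x t ih =>
    simp only [List.foldl_cons]
    by_cases hc : x.2 ≥ d ∧ x.1 > m
    · rw [if_pos hc]
      obtain ⟨h1, h2, h3⟩ := ih x.1
      refine ⟨by omega, ?_, ?_⟩
      · intro z hz hzd
        rcases List.mem_cons.mp hz with rfl | hz
        · exact h1
        · exact h2 z hz hzd
      · intro _
        by_cases he : t.foldl (fun m x => if x.2 ≥ d ∧ x.1 > m then x.1 else m) x.1 = x.1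
        · exact ⟨x, List.mem_cons_self, hc.1, he.symm⟩
        · obtain ⟨w, hw, hwd, hwe⟩ := h3 he
          exact ⟨w, List.mem_cons_of_mem _ hw, hwd, hwe⟩
    · rw [if_neg hc]
      obtain ⟨h1, h2, h3⟩ := ih m
      refine ⟨h1, ?_, ?_⟩
      · intro z hz hzd
        rcases List.mem_cons.mp hz with rfl | hz
        · have : ¬ z.1 > m := fun hgt => hc ⟨hzd, hgt⟩
          omega
        · exact h2 z hz hzd
      · intro hne
        obtain ⟨w, hw, hwd, hwe⟩ := h3 hne
        exact ⟨w, List.mem_cons_of_mem _ hw, hwd, hwe⟩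

lemma best_nonneg (d : Int) (l : List (Int × Int)) : 0 ≤ pvBest d l :=
  (best_fold_props d l 0).1

lemma best_ub (d : Int) (l : List (Int × Int)) : ∀ x ∈ l, x.2 ≥ d → x.1 ≤ pvBest d l :=
  (best_fold_props d l 0).2.1

lemma best_attained (d : Int) (l : List (Int × Int)) (h : pvBest d l ≠ 0) :
    ∃ x ∈ l, x.2 ≥ d ∧ x.1 = pvBest d l :=
  (best_fold_props d l 0).2.2 h

lemma best_snoc (d : Int) (l : List (Int × Int)) (y : Int × Int) :
    pvBest d (l ++ [y]) = if y.2 ≥ d ∧ y.1 > pvBest d l then y.1 else pvBest d l := by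
  simp only [pvBest, List.foldl_append, List.foldl_cons, List.foldl_nil]

lemma bestJ_eq_best_map (d : Int) (jobs : List (List (String × Int))) :
    pvBestJ d jobs = pvBest d (jobs.map (fun j => (pvPay j, pvDl j))) := by
  simp only [pvBestJ, pvBest, List.foldl_map]

lemma bridge_aux (d : Int) (hd : 1 ≤ d) (jobs : List (List (String × Int))) :
    ∀ m : Int, 0 ≤ m →
      jobs.foldl (fun m j => if pvDl j ≥ d ∧ pvPay j > m then pvPay j else m) m
        = (pvPairs jobs).foldl (fun m x => if x.2 ≥ d ∧ x.1 > m then x.1 else m) m := by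
  induction jobs with
  | nil => intro m _; simp [pvPairs]
  | cons j t ih =>
    intro m hm
    by_cases hp : 1 ≤ pvDl j ∧ 0 < pvPay j
    · have hpairs : pvPairs (j :: t) = (pvPay j, pvDl j) :: pvPairs t := by
        simp [pvPairs, hp]
      rw [hpairs, List.foldl_cons, List.foldl_cons]
      by_cases hc : pvDl j ≥ d ∧ pvPay j > m
      · rw [if_pos hc]
        exact ih (pvPay j) (by omega)
      · rw [if_neg hc]
        exact ih m hm
    · have hpairs : pvPairs (j :: t) = pvPairs t := by
        simp [pvPairs, hp]
      rw [hpairs, List.foldl_cons]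
      have hc : ¬ (pvDl j ≥ d ∧ pvPay j > m) := by omega
      rw [if_neg hc]
      exact ih m hm

lemma bridge (d : Int) (hd : 1 ≤ d) (jobs : List (List (String × Int))) :
    pvBestJ d jobs = pvBest d (pvPairs jobs) :=
  bridge_aux d hd jobs 0 le_rfl

lemma pairs_pos (jobs : List (List (String × Int))) : ∀ x ∈ pvPairs jobs, 0 < x.1 := by
  intro x hx
  simp only [pvPairs, List.mem_map, List.mem_filter, decide_eq_true_eq] at hx
  obtain ⟨j, ⟨_, _, hpv⟩, rfl⟩ := hx
  exact hpv

lemma bestJ_snoc (d : Int) (jobs : List (List (String × Int))) (y : List (String × Int)) :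
    pvBestJ d (jobs ++ [y]) =
      if pvDl y ≥ d ∧ pvPay y > pvBestJ d jobs then pvPay y else pvBestJ d jobs := by
  simp only [pvBestJ, List.foldl_append, List.foldl_cons, List.foldl_nil]

lemma bestJ_nonneg (d : Int) (jobs : List (List (String × Int))) : 0 ≤ pvBestJ d jobs := by
  rw [bestJ_eq_best_map]; exact best_nonneg _ _

lemma bestJ_ub (d : Int) (jobs : List (List (String × Int))) :
    ∀ j ∈ jobs, pvDl j ≥ d → pvPay j ≤ pvBestJ d jobs := by
  intro j hj hjd
  rw [bestJ_eq_best_map]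
  exact best_ub d _ (pvPay j, pvDl j) (List.mem_map_of_mem hj) hjd

lemma innerA_snoc (d : Int) (jobs : List (List (String × Int))) (y : List (String × Int)) :
    innerA d (jobs ++ [y]) =
      if pvDl y ≥ d ∧ pvPay y > (innerA d jobs).1
      then (pvPay y, some ((jobs.length : Int)))
      else innerA d jobs := by
  simp only [innerA, PySem.List.enumerate_append, PySem.List.enumerate_cons,
    PySem.List.enumerate_nil, List.foldl_append, List.foldl_cons, List.foldl_nil, zero_add]

lemma innerA_spec (d : Int) (jobs : List (List (String × Int))) :
    (innerA d jobs).1 = pvBestJ d jobs ∧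
    (pvBestJ d jobs ≠ 0 →
      ∃ i : Nat, (innerA d jobs).2 = some (i : Int) ∧ ∃ h : i < jobs.length,
        pvDl jobs[i] ≥ d ∧ pvPay jobs[i] = pvBestJ d jobs ∧
        ∀ x ∈ jobs.take i, ¬(pvDl x ≥ d ∧ pvPay x = pvBestJ d jobs)) := by
  induction jobs using List.reverseRecOn with
  | nil => exact ⟨rfl, fun h => absurd rfl h⟩
  | append_singleton l y ih =>
    obtain ⟨ih1, ih2⟩ := ih
    have hnn := bestJ_nonneg d l
    rw [innerA_snoc, bestJ_snoc, ih1]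
    by_cases hc : pvDl y ≥ d ∧ pvPay y > pvBestJ d l
    · rw [if_pos hc, if_pos hc]
      refine ⟨rfl, fun _ => ⟨l.length, rfl, by simp, ?_, ?_, ?_⟩⟩
      · rw [List.getElem_concat_length rfl]; exact hc.1
      · rw [List.getElem_concat_length rfl]
      · intro x hx hcon
        rw [List.take_left] at hx
        have := bestJ_ub d l x hx hcon.1
        omega
    · rw [if_neg hc, if_neg hc]
      refine ⟨ih1, fun hM => ?_⟩
      obtain ⟨i, hi2, h, hdl, hpv, hfirst⟩ := ih2 hM
      refine ⟨i, hi2, by simp; omega, ?_, ?_, ?_⟩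
      · rw [List.getElem_append_left h]; exact hdl
      · rw [List.getElem_append_left h]; exact hpv
      · intro x hx
        rw [List.take_append_of_le_length (le_of_lt h)] at hx
        exact hfirst x hx

lemma pairs_append (a b : List (List (String × Int))) :
    pvPairs (a ++ b) = pvPairs a ++ pvPairs b := by
  simp [pvPairs]

lemma pairs_eraseIdx (d : Int) (hd : 1 ≤ d) (jobs : List (List (String × Int))) (i : Nat)
    (h : i < jobs.length) (hM : pvBestJ d jobs ≠ 0)
    (hdl : pvDl jobs[i] ≥ d) (hpv : pvPay jobs[i] = pvBestJ d jobs)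
    (hfirst : ∀ x ∈ jobs.take i, ¬(pvDl x ≥ d ∧ pvPay x = pvBestJ d jobs)) :
    pvPairs (jobs.eraseIdx i) = (pvPairs jobs).eraseP (pvQ d (pvBestJ d jobs)) := by
  have hnn := bestJ_nonneg d jobs
  have hdecomp : jobs = jobs.take i ++ jobs[i] :: jobs.drop (i+1) := by
    conv_lhs => rw [← List.take_append_drop i jobs]
    rw [List.drop_eq_getElem_cons h]
  have hsingle : pvPairs [jobs[i]] = [(pvPay jobs[i], pvDl jobs[i])] := by
    simp only [pvPairs, List.filter_cons, List.filter_nil]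
    rw [if_pos (by simp; omega)]
    simp
  have hfull : pvPairs jobs
      = pvPairs (jobs.take i) ++ (pvPay jobs[i], pvDl jobs[i]) :: pvPairs (jobs.drop (i+1)) := by
    conv_lhs => rw [hdecomp]
    rw [show (jobs.take i ++ jobs[i] :: jobs.drop (i+1))
          = jobs.take i ++ ([jobs[i]] ++ jobs.drop (i+1)) by simp]
    rw [pairs_append, pairs_append, hsingle]
    simp
  rw [hfull, List.eraseP_append_right _ ?hskip, List.eraseP_cons_of_pos ?hhit]
  case hskip =>
    intro b hb
    simp only [pvPairs, List.mem_map, List.mem_filter, decide_eq_true_eq] at hb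
    obtain ⟨x, ⟨hx, _⟩, rfl⟩ := hb
    have := hfirst x hx
    simp only [pvQ, Bool.and_eq_true, decide_eq_true_eq, beq_iff_eq, not_and]
    intro h1 h2
    exact this ⟨h1, h2⟩
  case hhit => simp only [pvQ, Bool.and_eq_true, decide_eq_true_eq, beq_iff_eq]; exact ⟨hdl, hpv⟩
  rw [List.eraseIdx_eq_take_drop_succ, pairs_append]

lemma ins_split (y : Int × Int) (S : List (Int × Int))
    (desc : S.Pairwise (fun a b => b.1 ≤ a.1)) :
    ∃ P Q, S = P ++ Q ∧ pvIns y S = P ++ y :: Q ∧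
      (∀ z ∈ P, y.1 ≤ z.1) ∧ (∀ z ∈ Q, z.1 < y.1) := by
  induction S with
  | nil => exact ⟨[], [], rfl, by simp [pvIns, PySem.List.insertBy], by simp, by simp⟩
  | cons z S' ih =>
    by_cases hz : z.1 < y.1
    · refine ⟨[], z :: S', rfl, by simp [pvIns, PySem.List.insertBy, hz], by simp, ?_⟩
      intro w hw
      rcases List.mem_cons.mp hw with rfl | hw
      · exact hz
      · have := (List.pairwise_cons.mp desc).1 w hw
        omega
    · obtain ⟨P, Q, hS, hins, hP, hQ⟩ := ih (List.pairwise_cons.mp desc).2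
      refine ⟨z :: P, Q, by rw [List.cons_append, ← hS], ?_, ?_, hQ⟩
      · have : pvIns y (z :: S') = z :: pvIns y S' := by
          simp [pvIns, PySem.List.insertBy, hz]
        rw [this, hins, List.cons_append]
      · intro w hw
        rcases List.mem_cons.mp hw with rfl | hw
        · omega
        · exact hP w hw

lemma ins_partition (y : Int × Int) (X Y : List (Int × Int))
    (hX : ∀ z ∈ X, y.1 ≤ z.1) (hY : ∀ z ∈ Y, z.1 < y.1) :
    pvIns y (X ++ Y) = X ++ y :: Y := by
  induction X with
  | nil =>
    cases Y with
    | nil => simp [pvIns, PySem.List.insertBy]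
    | cons w Y' =>
      have hw := hY w List.mem_cons_self
      simp [pvIns, PySem.List.insertBy, hw]
  | cons x X' ihX =>
    have hx : ¬ x.1 < y.1 := by have := hX x List.mem_cons_self; omega
    have hstep : pvIns y (x :: (X' ++ Y)) = x :: pvIns y (X' ++ Y) := by
      simp [pvIns, PySem.List.insertBy, hx]
    rw [List.cons_append, hstep,
      ihX (fun z hz => hX z (List.mem_cons_of_mem _ hz)), List.cons_append]

lemma pickB_none_iff (d : Int) (S : List (Int × Int)) :
    pickB d S = none ↔ ∀ x ∈ S, ¬(x.2 ≥ d) := by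
  induction S with
  | nil => simp [pickB]
  | cons x t ih =>
    by_cases hx : x.2 ≥ d
    · simp [pickB, hx]
    · rw [show pickB d (x :: t)
          = (match pickB d t with
             | some pr => some (pr.1, x :: pr.2)
             | none => none) from by simp [pickB, hx]]
      cases hp : pickB d t with
      | none =>
        constructor
        · intro _ z hz
          rcases List.mem_cons.mp hz with rfl | hz
          · exact hx
          · exact (ih.mp hp) z hz
        · intro _; trivial
      | some pr =>
        constructor
        · intro hco; cases hco
        · intro hall
          have : pickB d t = none := ih.mpr (fun z hz => hall z (List.mem_cons_of_mem _ hz))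
          rw [hp] at this; cases this

lemma pickB_append (d : Int) (U T : List (Int × Int)) :
    pickB d (U ++ T) =
      match pickB d U with
      | some pr => some (pr.1, pr.2 ++ T)
      | none => (pickB d T).map (fun pr => (pr.1, U ++ pr.2)) := by
  induction U with
  | nil =>
    simp only [List.nil_append, pickB]
    cases pickB d T <;> simp
  | cons u U' ih =>
    by_cases hu : u.2 ≥ d
    · simp [pickB, hu]
    · have hcons : ∀ L, pickB d (u :: L)
          = (match pickB d L with
             | some pr => some (pr.1, u :: pr.2)
             | none => none) := fun L => by simp [pickB, hu]
      rw [List.cons_append, hcons (U' ++ T), ih, hcons U']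
      cases hU' : pickB d U' with
      | some pr => simp
      | none => cases hT : pickB d T <;> simp

lemma pickB_mem (d : Int) (S : List (Int × Int)) (p : Int) (S' : List (Int × Int))
    (h : pickB d S = some (p, S')) : ∀ z ∈ S', z ∈ S := by
  induction S generalizing p S' with
  | nil => simp [pickB] at h
  | cons x t ih =>
    by_cases hx : x.2 ≥ d
    · simp only [pickB, if_pos hx, Option.some.injEq, Prod.mk.injEq] at h
      intro z hz
      rw [← h.2] at hz
      exact List.mem_cons_of_mem _ hz
    · simp only [pickB, if_neg hx] at h
      cases hp : pickB d t with
      | none => rw [hp] at h; cases h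
      | some pr =>
        rw [hp] at h
        simp only [Option.some.injEq, Prod.mk.injEq] at h
        intro z hz
        rw [← h.2] at hz
        rcases List.mem_cons.mp hz with rfl | hz
        · exact List.mem_cons_self
        · exact List.mem_cons_of_mem _ (ih pr.1 pr.2 (by rw [hp]) z hz)

lemma pickB_some_val (d : Int) (S : List (Int × Int)) (p : Int) (S' : List (Int × Int))
    (h : pickB d S = some (p, S')) : ∃ x ∈ S, x.2 ≥ d ∧ x.1 = p := by
  induction S generalizing p S' with
  | nil => simp [pickB] at h
  | cons x t ih =>
    by_cases hx : x.2 ≥ d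
    · simp only [pickB, if_pos hx, Option.some.injEq, Prod.mk.injEq] at h
      exact ⟨x, List.mem_cons_self, hx, h.1⟩
    · simp only [pickB, if_neg hx] at h
      cases hp : pickB d t with
      | none => rw [hp] at h; cases h
      | some pr =>
        rw [hp] at h
        simp only [Option.some.injEq, Prod.mk.injEq] at h
        obtain ⟨w, hw, hwd, hwe⟩ := ih pr.1 pr.2 (by rw [hp])
        exact ⟨w, List.mem_cons_of_mem _ hw, hwd, by rw [hwe, h.1]⟩

lemma pick_sorted (d : Int) (l : List (Int × Int)) :
    (∀ x ∈ l, 0 < x.1) →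
    (pvBest d l = 0 → pickB d (pvSortR l) = none) ∧
    (pvBest d l ≠ 0 →
      pickB d (pvSortR l) = some (pvBest d l, pvSortR (l.eraseP (pvQ d (pvBest d l))))) := by
  induction l using List.reverseRecOn with
  | nil =>
    intro _
    refine ⟨fun _ => rfl, fun h => absurd rfl h⟩
  | append_singleton l y ih =>
    intro hpos
    have hy : 0 < y.1 := hpos y (by simp)
    have hpos' : ∀ x ∈ l, 0 < x.1 := fun x hx => hpos x (by simp [hx])
    obtain ⟨ihn, ihs⟩ := ih hpos'
    have hnn := best_nonneg d l
    have hsnoc := sortR_snoc l y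
    have desc : (pvSortR l).Pairwise (fun a b => b.1 ≤ a.1) :=
      PySem.List.sorted_pairwise_rev l (fun t => t.1)
    obtain ⟨P, Q, hS, hins, hP, hQ⟩ := ins_split y (pvSortR l) desc
    have memS : ∀ z, z ∈ pvSortR l ↔ z ∈ l :=
      fun z => PySem.List.mem_sorted l (fun t => t.1) true z
    have hbs := best_snoc d l y
    by_cases hc : y.2 ≥ d ∧ y.1 > pvBest d l
    · -- the new job strictly improves the best eligible payment
      have hM : pvBest d (l ++ [y]) = y.1 := by rw [hbs, if_pos hc]
      have hPinel : ∀ z ∈ P, ¬ (z.2 ≥ d) := by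
        intro z hz hzd
        have hzl : z ∈ l := (memS z).mp (by rw [hS]; exact List.mem_append_left _ hz)
        have h1 := best_ub d l z hzl hzd
        have h2 := hP z hz
        omega
      refine ⟨fun h0 => by omega, fun _ => ?_⟩
      rw [hsnoc, hins, pickB_append, (pickB_none_iff d P).mpr hPinel]
      rw [show pickB d (y :: Q) = some (y.1, Q) from by simp [pickB, hc.1]]
      have herase : (l ++ [y]).eraseP (pvQ d (pvBest d (l ++ [y]))) = l := by
        rw [hM, List.eraseP_append_right _ ?hno, List.eraseP_cons_of_pos (by simp [pvQ, hc.1]),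
          List.append_nil]
        case hno =>
          intro b hb
          simp only [pvQ, Bool.and_eq_true, decide_eq_true_eq, beq_iff_eq, not_and]
          intro hbd
          have := best_ub d l b hb hbd
          omega
      rw [herase, hM]
      show some (y.1, P ++ Q) = some (y.1, pvSortR l)
      rw [hS]
    · have hM : pvBest d (l ++ [y]) = pvBest d l := by rw [hbs, if_neg hc]
      by_cases hM0 : pvBest d l = 0
      · -- no eligible job at all
        refine ⟨fun _ => ?_, fun h0 => by omega⟩
        rw [hsnoc, hins]
        apply (pickB_none_iff _ _).mpr
        intro z hz
        rcases List.mem_append.mp hz with hzP | hzyQ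
        · intro hzd
          have hzl : z ∈ l := (memS z).mp (by rw [hS]; exact List.mem_append_left _ hzP)
          have := best_ub d l z hzl hzd
          have := hpos' z hzl
          omega
        · rcases List.mem_cons.mp hzyQ with rfl | hzQ
          · intro hzd
            have : ¬ z.1 > pvBest d l := fun hgt => hc ⟨hzd, hgt⟩
            omega
          · intro hzd
            have hzl : z ∈ l := (memS z).mp (by rw [hS]; exact List.mem_append_right _ hzQ)
            have := best_ub d l z hzl hzd
            have := hpos' z hzl
            omega
      · -- the best stays in l; stability: the same element is still picked
        have hpick := ihs hM0
        obtain ⟨w, hwl, hwd, hwe⟩ := best_attained d l hM0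
        have herase : (l ++ [y]).eraseP (pvQ d (pvBest d l))
            = l.eraseP (pvQ d (pvBest d l)) ++ [y] :=
          List.eraseP_append_left (by simp [pvQ, hwd, hwe]) _ hwl
        refine ⟨fun h0 => by omega, fun _ => ?_⟩
        rw [hM, hsnoc, hins, pickB_append, herase, sortR_snoc]
        cases hPp : pickB d P with
        | some pr =>
          obtain ⟨p, P'⟩ := pr
          have h1 : pickB d (pvSortR l) = some (p, P' ++ Q) := by
            rw [hS, pickB_append, hPp]
          rw [hpick] at h1
          simp only [Option.some.injEq, Prod.mk.injEq] at h1
          have hinsP : pvIns y (P' ++ Q) = P' ++ y :: Q :=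
            ins_partition y P' Q (fun z hz => hP z (pickB_mem d P p P' hPp z hz)) hQ
          show some (p, P' ++ y :: Q)
              = some (pvBest d l, pvIns y (pvSortR (List.eraseP (pvQ d (pvBest d l)) l)))
          rw [h1.2, hinsP, h1.1]
        | none =>
          have h1 : pickB d (pvSortR l)
              = (pickB d Q).map (fun pr => (pr.1, P ++ pr.2)) := by
            rw [hS, pickB_append, hPp]
          rw [hpick] at h1
          cases hQp : pickB d Q with
          | none => rw [hQp] at h1; cases h1
          | some qr =>
            obtain ⟨q, Q'⟩ := qr
            rw [hQp] at h1
            simp only [Option.map_some, Option.some.injEq, Prod.mk.injEq] at h1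
            have hyinel : ¬ y.2 ≥ d := by
              intro hyd
              obtain ⟨x, hxQ, hxd, hxe⟩ := pickB_some_val d Q q Q' hQp
              have h2 := hQ x hxQ
              have h3 : ¬ y.1 > pvBest d l := fun hgt => hc ⟨hyd, hgt⟩
              omega
            rw [show pickB d (y :: Q) = some (q, y :: Q') from by
              simp [pickB, hyinel, hQp]]
            simp only [Option.map_some]
            have hinsP : pvIns y (P ++ Q') = P ++ y :: Q' :=
              ins_partition y P Q' hP (fun z hz => hQ z (pickB_mem d Q q Q' hQp z hz))
            show some (q, P ++ y :: Q')
                = some (pvBest d l, pvIns y (pvSortR (List.eraseP (pvQ d (pvBest d l)) l)))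
            rw [h1.2, hinsP, h1.1]

lemma loop_eq (n : Nat) (jobs : List (List (String × Int))) (total : Int) :
    loopA n jobs total = loopB n (pvSortR (pvPairs jobs)) total := by
  induction n generalizing jobs total with
  | zero => rfl
  | succ n ih =>
    have hd : (1:Int) ≤ (n:Int) + 1 := by
      have := Int.natCast_nonneg n; omega
    obtain ⟨h1, h2⟩ := innerA_spec ((n:Int)+1) jobs
    have hb := bridge ((n:Int)+1) hd jobs
    obtain ⟨pn, ps⟩ := pick_sorted ((n:Int)+1) (pvPairs jobs) (pairs_pos jobs)
    by_cases hM : pvBestJ ((n:Int)+1) jobs = 0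
    · have hA : loopA (n+1) jobs total = loopA n jobs total := by
        simp only [loopA]
        rw [if_neg (by rw [h1, hM]; simp)]
      have hpickn : pickB ((n:Int)+1) (pvSortR (pvPairs jobs)) = none :=
        pn (by rw [← hb]; exact hM)
      have hB : loopB (n+1) (pvSortR (pvPairs jobs)) total
          = loopB n (pvSortR (pvPairs jobs)) total := by
        simp only [loopB, hpickn]
      rw [hA, hB]
      exact ih jobs total
    · obtain ⟨i, hi2, h, hdl, hpv, hfirst⟩ := h2 hM
      have hpop := PySem.List.pop?_natCast jobs i h
      have hA : loopA (n+1) jobs total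
          = loopA n (jobs.eraseIdx i) (total + pvBestJ ((n:Int)+1) jobs) := by
        simp only [loopA, h1, hi2, Option.getD_some, hpop]
        rw [if_pos hM]
      have hps := ps (by rw [← hb]; exact hM)
      rw [← hb] at hps
      have hB : loopB (n+1) (pvSortR (pvPairs jobs)) total
          = loopB n (pvSortR ((pvPairs jobs).eraseP (pvQ ((n:Int)+1) (pvBestJ ((n:Int)+1) jobs))))
              (total + pvBestJ ((n:Int)+1) jobs) := by
        simp only [loopB, hps]
      rw [hA, hB, ← pairs_eraseIdx ((n:Int)+1) hd jobs i h hM hdl hpv hfirst]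
      exact ih (jobs.eraseIdx i) (total + pvBestJ ((n:Int)+1) jobs)

-- ===== VERDICT (by name: the statement is the Claim_ definition above) =====
theorem optimalFreelance_spec : Claim_equal_optimalFreelance := by
  intro jobs _ _
  unfold Spec_optimalFreelance optimalFreelance optimalFreelance_alt
  exact loop_eq 7 jobs 0
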